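-- pv_equiv track=rewrite | github.com/QAGIw3/PlatformQ | services/quantum-optimization-service/app/engines/solution_decoder.py | _check_minimal_cover
-- ===== SOURCE A (Python) =====
-- from typing import Dict, List, Tuple, Optional, Any
--
-- def _check_minimal_cover(cover: List[int], edges: List[Tuple]) -> bool:
--     """Check if vertex cover is minimal"""
--     # Try removing each vertex
--     for vertex in cover:
--         test_cover = [v for v in cover if v != vertex]
--         # Check if still covers all edges
--         all_covered = True
--         for u, v in edges:
--             if u not in test_cover and v not in test_cover:
--                 all_covered = False
--                 break
--         if all_covered:
--             return False  # Not minimal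
--     return True
-- ===== SOURCE B (Python) =====
-- def _check_minimal_cover(cover, edges):
--     """Check if vertex cover is minimal (single pass over edges)."""
--     cs = set(cover)
--     critical = set()
--     for u, v in edges:
--         inc = {x for x in (u, v) if x in cs}
--         if not inc:
--             # An edge no cover vertex touches: removing any vertex still
--             # leaves it uncovered, so the cover is (vacuously) minimal.
--             return True
--         if len(inc) == 1:
--             critical |= inc
--     return all(w in critical for w in cs)
-- ===== Notes on version B (the rewrite author's own statement) =====
-- stated objective: faster
-- what changed: Replaces A's remove-each-vertex-and-recheck-all-edges double loop by a single pass over the edges that collects, per edge, its set of cover endpoints: an uncovered edge means vacuously minimal, and the cover is minimal iff every cover vertex is the sole cover endpoint of some edge.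
import Mathlib
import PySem

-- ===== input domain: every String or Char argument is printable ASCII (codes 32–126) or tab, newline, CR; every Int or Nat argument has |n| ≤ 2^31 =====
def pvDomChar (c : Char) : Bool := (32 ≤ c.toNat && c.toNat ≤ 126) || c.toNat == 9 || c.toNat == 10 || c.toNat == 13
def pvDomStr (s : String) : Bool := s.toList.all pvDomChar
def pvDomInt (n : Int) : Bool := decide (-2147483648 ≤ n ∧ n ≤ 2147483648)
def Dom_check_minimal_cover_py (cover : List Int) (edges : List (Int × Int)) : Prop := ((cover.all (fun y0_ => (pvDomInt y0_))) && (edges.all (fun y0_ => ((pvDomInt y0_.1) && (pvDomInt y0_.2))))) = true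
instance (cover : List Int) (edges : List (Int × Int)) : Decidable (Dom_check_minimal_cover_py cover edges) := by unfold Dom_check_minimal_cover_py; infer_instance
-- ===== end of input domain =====

-- B replaces A's O(|cover|·|edges|) remove-and-recheck loop by one pass over the edges
-- collecting the vertices that are the sole cover-endpoint of some edge (objective: faster).

-- ===== PORT A =====
-- inner 'for u, v in edges' loop with its all_covered flag and break
def pvCoversAll (test : List Int) (edges : List (Int × Int)) : Bool :=
  match edges with
  | [] => true
  | (u, v) :: rest =>
      if !test.contains u && !test.contains v then false
      else pvCoversAll test rest

-- outer 'for vertex in cover' loop; test_cover = [v for v in cover if v != vertex]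
def pvLoopA (pending cover : List Int) (edges : List (Int × Int)) : Bool :=
  match pending with
  | [] => true
  | vertex :: rest =>
      let test_cover := cover.filter (fun v => v ≠ vertex)
      if pvCoversAll test_cover edges then false
      else pvLoopA rest cover edges

def check_minimal_cover_py (cover : List Int) (edges : List (Int × Int)) : Bool :=
  pvLoopA cover cover edges

-- ===== PORT B =====
-- inc = {x for x in (u, v) if x in cs}
def pvIncl (cs : PySem.Set Int) (u v : Int) : PySem.Set Int :=
  PySem.Set.ofList (([u, v]).filter (fun x => PySem.Set.contains cs x))

-- the 'for u, v in edges' loop of B, with the early 'return True' and the final all(...)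
def pvLoopB (cs : PySem.Set Int) (edges : List (Int × Int)) (critical : PySem.Set Int) : Bool :=
  match edges with
  | [] => cs.all (fun w => PySem.Set.contains critical w)
  | (u, v) :: rest =>
      let inc := pvIncl cs u v
      if inc.isEmpty then true
      else if inc.length == 1 then pvLoopB cs rest (PySem.Set.union critical inc)
      else pvLoopB cs rest critical

def check_minimal_cover_py_alt (cover : List Int) (edges : List (Int × Int)) : Bool :=
  pvLoopB (PySem.Set.ofList cover) edges PySem.Set.empty

-- ===== PRECONDITION & SPEC =====
def Spec_check_minimal_cover_py (cover : List Int) (edges : List (Int × Int)) (out : Bool) : Prop := out = check_minimal_cover_py_alt cover edges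
instance (cover : List Int) (edges : List (Int × Int)) (out : Bool) : Decidable (Spec_check_minimal_cover_py cover edges out) := by unfold Spec_check_minimal_cover_py; infer_instance

-- ===== CLAIM (what is proved, stated in full; the proofs are below) =====
def Claim_equal_check_minimal_cover_py : Prop := ∀ (cover : List Int) (edges : List (Int × Int)), Dom_check_minimal_cover_py cover edges → Spec_check_minimal_cover_py cover edges (check_minimal_cover_py cover edges)

-- ===== LEMMAS AND PROOFS =====

lemma mem_pvIncl (cs : List Int) (u v x : Int) :
    x ∈ pvIncl cs u v ↔ (x = u ∨ x = v) ∧ x ∈ cs := by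
  simp [pvIncl, PySem.Set.mem_ofList, List.mem_filter, PySem.Set.contains]

lemma pvIncl_nil_iff (cs : List Int) (u v : Int) :
    pvIncl cs u v = [] ↔ u ∉ cs ∧ v ∉ cs := by
  constructor
  · intro h
    constructor <;> intro hm
    · have : u ∈ pvIncl cs u v := (mem_pvIncl cs u v u).2 ⟨Or.inl rfl, hm⟩
      simp [h] at this
    · have : v ∈ pvIncl cs u v := (mem_pvIncl cs u v v).2 ⟨Or.inr rfl, hm⟩
      simp [h] at this
  · rintro ⟨hu, hv⟩
    have : ∀ x, x ∉ pvIncl cs u v := by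
      intro x hx
      rcases (mem_pvIncl cs u v x).1 hx with ⟨hxe, hxc⟩
      rcases hxe with rfl | rfl <;> [exact hu hxc; exact hv hxc]
    exact List.eq_nil_iff_forall_not_mem.2 this

lemma pvIncl_singleton_iff (cs : List Int) (u v w : Int) :
    pvIncl cs u v = [w] ↔
      w ∈ cs ∧ (w = u ∨ w = v) ∧ (u ∈ cs → u = w) ∧ (v ∈ cs → v = w) := by
  by_cases hu : u ∈ cs <;> by_cases hv : v ∈ cs
  · by_cases huv : u = v
    · subst huv
      have : pvIncl cs u u = [u] := by
        simp [pvIncl, PySem.Set.ofList, PySem.Set.add, PySem.Set.empty,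
              PySem.Set.contains, hu]
      rw [this]
      constructor
      · rintro h; cases h; exact ⟨hu, Or.inl rfl, fun _ => rfl, fun _ => rfl⟩
      · rintro ⟨_, hw, _, _⟩
        rcases hw with rfl | rfl <;> rfl
    · have : pvIncl cs u v = [u, v] := by
        simp [pvIncl, PySem.Set.ofList, PySem.Set.add, PySem.Set.empty,
              PySem.Set.contains, hu, hv, huv, Ne.symm huv]
      rw [this]
      constructor
      · intro h; cases h
      · rintro ⟨_, hw, h1, h2⟩
        exact absurd ((h1 hu).trans (h2 hv).symm) huv
  · have : pvIncl cs u v = [u] := by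
      simp [pvIncl, PySem.Set.ofList, PySem.Set.add, PySem.Set.empty,
            PySem.Set.contains, hu, hv]
    rw [this]
    constructor
    · rintro h; cases h
      exact ⟨hu, Or.inl rfl, fun _ => rfl, fun hv' => absurd hv' hv⟩
    · rintro ⟨hw, hwuv, h1, _⟩
      have := h1 hu; subst this; rfl
  · have : pvIncl cs u v = [v] := by
      simp [pvIncl, PySem.Set.ofList, PySem.Set.add, PySem.Set.empty,
            PySem.Set.contains, hu, hv]
    rw [this]
    constructor
    · rintro h; cases h
      exact ⟨hv, Or.inr rfl, fun hu' => absurd hu' hu, fun _ => rfl⟩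
    · rintro ⟨hw, hwuv, _, h2⟩
      have := h2 hv; subst this; rfl
  · have : pvIncl cs u v = [] := (pvIncl_nil_iff cs u v).2 ⟨hu, hv⟩
    rw [this]
    constructor
    · intro h; cases h
    · rintro ⟨hw, hwuv, _, _⟩
      rcases hwuv with rfl | rfl <;> [exact absurd hw hu; exact absurd hw hv]

-- the four possible shapes of inc
lemma pvIncl_shape (cs : List Int) (u v : Int) :
    pvIncl cs u v = [] ∨ (∃ x, pvIncl cs u v = [x]) ∨
      (∃ x y, x ≠ y ∧ pvIncl cs u v = [x, y]) := by
  by_cases hu : u ∈ cs <;> by_cases hv : v ∈ cs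
  · by_cases huv : u = v
    · subst huv
      refine Or.inr (Or.inl ⟨u, ?_⟩)
      simp [pvIncl, PySem.Set.ofList, PySem.Set.add, PySem.Set.empty,
            PySem.Set.contains, hu]
    · refine Or.inr (Or.inr ⟨u, v, huv, ?_⟩)
      simp [pvIncl, PySem.Set.ofList, PySem.Set.add, PySem.Set.empty,
            PySem.Set.contains, hu, hv, huv, Ne.symm huv]
  · refine Or.inr (Or.inl ⟨u, ?_⟩)
    simp [pvIncl, PySem.Set.ofList, PySem.Set.add, PySem.Set.empty,
          PySem.Set.contains, hu, hv]
  · refine Or.inr (Or.inl ⟨v, ?_⟩)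
    simp [pvIncl, PySem.Set.ofList, PySem.Set.add, PySem.Set.empty,
          PySem.Set.contains, hu, hv]
  · exact Or.inl ((pvIncl_nil_iff cs u v).2 ⟨hu, hv⟩)

-- characterization of the inner loop of A
lemma pvCoversAll_eq (test : List Int) (edges : List (Int × Int)) :
    pvCoversAll test edges = edges.all (fun e => test.contains e.1 || test.contains e.2) := by
  induction edges with
  | nil => rfl
  | cons e rest ih =>
      obtain ⟨u, v⟩ := e
      simp only [pvCoversAll, List.all_cons]
      by_cases hu : test.contains u <;> by_cases hv : test.contains v <;>
        simp [hu, hv, ih]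

-- characterization of the outer loop of A
lemma pvLoopA_eq (pending cover : List Int) (edges : List (Int × Int)) :
    pvLoopA pending cover edges =
      !pending.any (fun vtx => pvCoversAll (cover.filter (fun v => v ≠ vtx)) edges) := by
  induction pending with
  | nil => rfl
  | cons vtx rest ih =>
      simp only [pvLoopA, List.any_cons]
      by_cases h : pvCoversAll (cover.filter (fun v => v ≠ vtx)) edges <;> simp [h, ih]

-- A = true iff no vertex of cover can be dropped (in terms of memberships)
lemma A_char (cover : List Int) (edges : List (Int × Int)) :
    check_minimal_cover_py cover edges = true ↔
      ∀ vtx ∈ cover, ¬ (∀ e ∈ edges,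
        (e.1 ∈ cover ∧ e.1 ≠ vtx) ∨ (e.2 ∈ cover ∧ e.2 ≠ vtx)) := by
  unfold check_minimal_cover_py
  rw [pvLoopA_eq]
  simp only [Bool.not_eq_eq_eq_not, Bool.not_true, List.any_eq_false, pvCoversAll_eq]
  have key : ∀ vtx : Int, ∀ e : Int × Int,
      (((cover.filter (fun v => v ≠ vtx)).contains e.1
        || (cover.filter (fun v => v ≠ vtx)).contains e.2) = true)
      ↔ ((e.1 ∈ cover ∧ e.1 ≠ vtx) ∨ (e.2 ∈ cover ∧ e.2 ≠ vtx)) := by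
    intro vtx e
    simp [List.mem_filter]
  constructor
  · intro h vtx hvtx hall
    refine h vtx hvtx ?_
    simp only [List.all_eq_true]
    intro e he
    exact (key vtx e).2 (hall e he)
  · intro h vtx hvtx hall
    refine h vtx hvtx ?_
    simp only [List.all_eq_true] at hall
    intro e he
    exact (key vtx e).1 (hall e he)

-- invariant of B's single edge pass
lemma pvLoopB_char (edges : List (Int × Int)) (cs crit : List Int) :
    pvLoopB cs edges crit = true ↔
      (∃ e ∈ edges, pvIncl cs e.1 e.2 = []) ∨
      (∀ w ∈ cs, w ∈ crit ∨ ∃ e ∈ edges, pvIncl cs e.1 e.2 = [w]) := by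
  induction edges generalizing crit with
  | nil =>
      simp [pvLoopB, List.all_eq_true, PySem.Set.contains, List.contains_iff_mem]
  | cons e rest ih =>
      obtain ⟨u, v⟩ := e
      rcases pvIncl_shape cs u v with hsh | ⟨x, hsh⟩ | ⟨x, y, hxy, hsh⟩
      · simp only [pvLoopB, hsh, List.isEmpty_nil, if_true, true_iff]
        exact Or.inl ⟨(u, v), List.mem_cons_self .., hsh⟩
      · simp only [pvLoopB, hsh, List.isEmpty_cons, List.length_singleton]
        have hcrit : PySem.Set.union crit [x] = PySem.Set.add crit x := rfl
        simp only [Bool.false_eq_true, if_false, beq_self_eq_true, if_true, hcrit, ih]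
        constructor
        · rintro (⟨e, he, hne⟩ | hall)
          · exact Or.inl ⟨e, List.mem_cons_of_mem _ he, hne⟩
          · refine Or.inr fun w hw => ?_
            rcases hall w hw with hmem | ⟨e, he, hse⟩
            · rcases (PySem.Set.mem_add crit x w).1 hmem with h | rfl
              · exact Or.inl h
              · exact Or.inr ⟨(u, v), List.mem_cons_self .., hsh⟩
            · exact Or.inr ⟨e, List.mem_cons_of_mem _ he, hse⟩
        · rintro (⟨e, he, hne⟩ | hall)
          · rcases List.mem_cons.1 he with rfl | he'
            · rw [hsh] at hne; cases hne
            · exact Or.inl ⟨e, he', hne⟩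
          · refine Or.inr fun w hw => ?_
            rcases hall w hw with hmem | ⟨e, he, hse⟩
            · exact Or.inl ((PySem.Set.mem_add crit x w).2 (Or.inl hmem))
            · rcases List.mem_cons.1 he with rfl | he'
              · rw [hsh] at hse
                have : w = x := by cases hse; rfl
                exact Or.inl ((PySem.Set.mem_add crit x w).2 (Or.inr this))
              · exact Or.inr ⟨e, he', hse⟩
      · simp only [pvLoopB, hsh, List.isEmpty_cons, List.length_cons, List.length_nil,
          Nat.reduceAdd, Bool.false_eq_true, if_false,
          show ((2 : Nat) == 1) = false from rfl, ih]
        constructor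
        · rintro (⟨e, he, hne⟩ | hall)
          · exact Or.inl ⟨e, List.mem_cons_of_mem _ he, hne⟩
          · refine Or.inr fun w hw => ?_
            rcases hall w hw with hmem | ⟨e, he, hse⟩
            · exact Or.inl hmem
            · exact Or.inr ⟨e, List.mem_cons_of_mem _ he, hse⟩
        · rintro (⟨e, he, hne⟩ | hall)
          · rcases List.mem_cons.1 he with rfl | he'
            · rw [hsh] at hne; cases hne
            · exact Or.inl ⟨e, he', hne⟩
          · refine Or.inr fun w hw => ?_
            rcases hall w hw with hmem | ⟨e, he, hse⟩
            · exact Or.inl hmem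
            · rcases List.mem_cons.1 he with rfl | he'
              · rw [hsh] at hse; cases hse
              · exact Or.inr ⟨e, he', hse⟩

lemma B_char (cover : List Int) (edges : List (Int × Int)) :
    check_minimal_cover_py_alt cover edges = true ↔
      (∃ e ∈ edges, e.1 ∉ cover ∧ e.2 ∉ cover) ∨
      (∀ w ∈ cover, ∃ e ∈ edges,
        w ∈ cover ∧ (w = e.1 ∨ w = e.2) ∧ (e.1 ∈ cover → e.1 = w) ∧ (e.2 ∈ cover → e.2 = w)) := by
  unfold check_minimal_cover_py_alt
  rw [pvLoopB_char]
  have hmem : ∀ x : Int, x ∈ PySem.Set.ofList cover ↔ x ∈ cover :=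
    fun x => PySem.Set.mem_ofList cover x
  constructor
  · rintro (⟨e, he, hne⟩ | hall)
    · rw [pvIncl_nil_iff] at hne
      exact Or.inl ⟨e, he, (hmem e.1).not.1 hne.1, (hmem e.2).not.1 hne.2⟩
    · refine Or.inr fun w hw => ?_
      rcases hall w ((hmem w).2 hw) with hc | ⟨e, he, hse⟩
      · simp [PySem.Set.empty] at hc
      · rw [pvIncl_singleton_iff] at hse
        obtain ⟨h1, h2, h3, h4⟩ := hse
        exact ⟨e, he, (hmem w).1 h1, h2, fun h => h3 ((hmem e.1).2 h),
               fun h => h4 ((hmem e.2).2 h)⟩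
  · rintro (⟨e, he, hne⟩ | hall)
    · refine Or.inl ⟨e, he, ?_⟩
      rw [pvIncl_nil_iff]
      exact ⟨(hmem e.1).not.2 hne.1, (hmem e.2).not.2 hne.2⟩
    · refine Or.inr fun w hw => ?_
      obtain ⟨e, he, h1, h2, h3, h4⟩ := hall w ((hmem w).1 hw)
      refine Or.inr ⟨e, he, ?_⟩
      rw [pvIncl_singleton_iff]
      exact ⟨(hmem w).2 h1, h2, fun h => h3 ((hmem e.1).1 h), fun h => h4 ((hmem e.2).1 h)⟩

-- the purely logical equivalence of the two characterizations
lemma logic_equiv (cover : List Int) (edges : List (Int × Int)) :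
    (∀ vtx ∈ cover, ¬ (∀ e ∈ edges,
        (e.1 ∈ cover ∧ e.1 ≠ vtx) ∨ (e.2 ∈ cover ∧ e.2 ≠ vtx))) ↔
      ((∃ e ∈ edges, e.1 ∉ cover ∧ e.2 ∉ cover) ∨
       (∀ w ∈ cover, ∃ e ∈ edges,
         w ∈ cover ∧ (w = e.1 ∨ w = e.2) ∧ (e.1 ∈ cover → e.1 = w) ∧ (e.2 ∈ cover → e.2 = w))) := by
  constructor
  · intro h
    by_cases hunc : ∃ e ∈ edges, e.1 ∉ cover ∧ e.2 ∉ cover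
    · exact Or.inl hunc
    · push_neg at hunc
      refine Or.inr fun w hw => ?_
      have := h w hw
      push_neg at this
      obtain ⟨e, he, hn1, hn2⟩ := this
      have hcov : e.1 ∈ cover ∨ e.2 ∈ cover := or_iff_not_imp_left.2 (hunc e he)
      refine ⟨e, he, hw, ?_, hn1, hn2⟩
      rcases hcov with hc | hc
      · exact Or.inl (hn1 hc).symm
      · exact Or.inr (hn2 hc).symm
  · rintro (⟨e, he, hne1, hne2⟩ | hall) <;> intro vtx hvtx hall'
    · rcases hall' e he with ⟨hm, _⟩ | ⟨hm, _⟩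
      · exact hne1 hm
      · exact hne2 hm
    · obtain ⟨e, he, _, h2, h3, h4⟩ := hall vtx hvtx
      rcases hall' e he with ⟨hm, hne⟩ | ⟨hm, hne⟩
      · exact hne (h3 hm)
      · exact hne (h4 hm)

-- ===== VERDICT (by name: the statement is the Claim_ definition above) =====
theorem check_minimal_cover_py_spec : Claim_equal_check_minimal_cover_py := by
  intro cover edges _
  unfold Spec_check_minimal_cover_py
  have h := (A_char cover edges).trans
    ((logic_equiv cover edges).trans (B_char cover edges).symm)
  by_cases hA : check_minimal_cover_py cover edges = true
  · rw [hA, (h.1 hA).symm]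
  · have hB : ¬ check_minimal_cover_py_alt cover edges = true := fun hb => hA (h.2 hb)
    simp only [Bool.not_eq_true] at hA hB
    rw [hA, hB]
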